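-- pv_equiv track=rewrite | github.com/pypi-data/pypi-mirror-397 | packages/markdown-table-fixer/markdown_table_fixer-0.1.4.tar.gz/markdown_table_fixer-0.1.4/src/markdown_table_fixer/table_fixer.py | _remove_jsonc_comments
-- ===== SOURCE A (Python) =====
-- def _remove_jsonc_comments(content: str) -> str:
--     """Remove comments from JSONC content.
--
--     This is a simple implementation that removes // comments while being
--     aware of strings. It's not perfect but handles most common cases.
--
--     Args:
--         content: JSONC content string
--
--     Returns:
--         Content with comments removed
--     """
--     lines = []
--     for line in content.split("\n"):
--         # Track if we're inside a string
--         in_string = False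
--         escape_next = False
--         processed = []
--
--         i = 0
--         while i < len(line):
--             char = line[i]
--
--             if escape_next:
--                 processed.append(char)
--                 escape_next = False
--                 i += 1
--                 continue
--
--             if char == "\\":
--                 processed.append(char)
--                 escape_next = True
--                 i += 1
--                 continue
--
--             if char == '"':
--                 in_string = not in_string
--                 processed.append(char)
--                 i += 1
--                 continue
--
--             # Check for comment start (only outside strings)
--             if (
--                 not in_string
--                 and i < len(line) - 1
--                 and line[i : i + 2] == "//"
--             ):
--                 # Rest of line is a comment
--                 break
--
--             processed.append(char)
--             i += 1
--
--         lines.append("".join(processed))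
--
--     return "\n".join(lines)
-- ===== SOURCE B (Python) =====
-- import re
--
-- # Tokenizer: escape sequences and string literals (possibly unterminated) are kept;
-- # the first comment token found outside them marks the cut point of the line.
-- _TOKEN = re.compile(r'\\.|"(?:\\.|[^"\\])*"?|//')
--
--
-- def _cut_line(line: str) -> str:
--     for m in _TOKEN.finditer(line):
--         if m.group() == "//":
--             return line[: m.start()]
--     return line
--
--
-- def _remove_jsonc_comments(content: str) -> str:
--     return "\n".join(_cut_line(line) for line in content.split("\n"))
-- ===== Notes on version B (the rewrite author's own statement) =====
-- stated objective: idiomatic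
-- what changed: Replaces the hand-written per-character state machine (in_string/escape_next flags with explicit index bookkeeping) by a per-line regex tokenizer: one compiled pattern alternates escape sequences, (possibly unterminated) string literals and '//'; the line is sliced at the first '//' token found outside the other tokens.
import Mathlib
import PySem

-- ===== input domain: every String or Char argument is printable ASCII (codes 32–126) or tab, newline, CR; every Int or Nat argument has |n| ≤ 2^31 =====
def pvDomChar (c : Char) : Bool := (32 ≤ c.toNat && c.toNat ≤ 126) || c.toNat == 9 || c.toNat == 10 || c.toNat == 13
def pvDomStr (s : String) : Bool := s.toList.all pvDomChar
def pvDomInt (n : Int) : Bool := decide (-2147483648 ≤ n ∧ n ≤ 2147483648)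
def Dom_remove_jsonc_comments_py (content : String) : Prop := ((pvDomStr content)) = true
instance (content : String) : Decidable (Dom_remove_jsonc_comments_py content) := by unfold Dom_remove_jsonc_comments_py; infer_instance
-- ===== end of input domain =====

-- B replaces A's per-character state machine by a regex tokenizer per line; same return value, no speed claim.

-- ===== PORT A =====
-- A's inner while-loop over one line: remaining chars, in_string flag, escape_next flag.
def pvALoop : List Char → Bool → Bool → List Char
  | [], _, _ => []
  | c :: rest, inStr, esc =>
    if esc then c :: pvALoop rest inStr false
    else if c = '\\' then c :: pvALoop rest inStr true
    else if c = '"' then c :: pvALoop rest (!inStr) false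
    else if !inStr && !rest.isEmpty && ((c :: rest).take 2 == ['/', '/']) then []
    else c :: pvALoop rest inStr false

def remove_jsonc_comments_py (content : String) : String :=
  PySem.Str.join "\n"
    ((PySem.Chars.splitOn content.toList ['\n']).map (fun line => String.ofList (pvALoop line false false)))

-- ===== PORT B =====
-- B's regex token '"(?:\\.|[^"\\])*"?' after the opening quote: returns (matched body incl. closing quote, rest).
def pvBStr : List Char → List Char × List Char
  | [] => ([], [])
  | '"' :: rest => (['"'], rest)
  | '\\' :: c :: rest =>
      let p := pvBStr rest
      ('\\' :: c :: p.1, p.2)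
  | '\\' :: [] => ([], ['\\'])   -- lone backslash: the star stops, no closing quote matched
  | c :: rest =>
      let p := pvBStr rest
      (c :: p.1, p.2)

theorem pvBStr_len (l : List Char) : (pvBStr l).2.length ≤ l.length := by
  induction l using pvBStr.induct <;> simp_all [pvBStr] <;> omega

-- B's finditer scan over the pattern  \\. | "(?:\\.|[^"\\])*"? | //  ; the line is sliced
-- at the start of the first '//' token, so the scan returns the kept prefix of the line.
def pvBScan : List Char → List Char
  | [] => []
  | '\\' :: c :: rest => '\\' :: c :: pvBScan rest
  | '"' :: rest =>
      let p := pvBStr rest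
      '"' :: (p.1 ++ pvBScan p.2)
  | '/' :: '/' :: _ => []
  | c :: rest => c :: pvBScan rest
termination_by l => l.length
decreasing_by
  · simp
  · have := pvBStr_len rest; simp; omega
  · simp

def remove_jsonc_comments_py_alt (content : String) : String :=
  PySem.Str.join "\n"
    ((PySem.Chars.splitOn content.toList ['\n']).map (fun line => String.ofList (pvBScan line)))

-- ===== PRECONDITION & SPEC =====
def Spec_remove_jsonc_comments_py (content : String) (out : String) : Prop := out = remove_jsonc_comments_py_alt content
instance (content : String) (out : String) : Decidable (Spec_remove_jsonc_comments_py content out) := by unfold Spec_remove_jsonc_comments_py; infer_instance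

-- ===== CLAIM (what is proved, stated in full; the proofs are below) =====
def Claim_equal_remove_jsonc_comments_py : Prop := ∀ (content : String), Dom_remove_jsonc_comments_py content → Spec_remove_jsonc_comments_py content (remove_jsonc_comments_py content)

-- ===== LEMMAS AND PROOFS =====

-- the catch-all branch of B's scanner
theorem pvBScan_other (c : Char) (rest : List Char) (hb : c ≠ '\\') (hq : c ≠ '"')
    (hs : ¬(c = '/' ∧ rest.head? = some '/')) :
    pvBScan (c :: rest) = c :: pvBScan rest := by
  conv_lhs => rw [pvBScan.eq_def]
  split
  · rename_i heq; cases heq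
  · rename_i heq; injection heq with h1 _; exact absurd h1 hb
  · rename_i heq; injection heq with h1 _; exact absurd h1 hq
  · rename_i heq; injection heq with h1 h2; exact absurd ⟨h1, by rw [h2]; rfl⟩ hs
  · rename_i heq; injection heq with h1 h2; rw [h1, h2]

-- the catch-all branch of B's string token
theorem pvBStr_other (c : Char) (rest : List Char) (hb : c ≠ '\\') (hq : c ≠ '"') :
    pvBStr (c :: rest) = (c :: (pvBStr rest).1, (pvBStr rest).2) := by
  conv_lhs => rw [pvBStr.eq_def]
  split
  · rename_i heq; cases heq
  · rename_i heq; injection heq with h1 _; exact absurd h1 hq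
  · rename_i heq; injection heq with h1 _; exact absurd h1 hb
  · rename_i heq; injection heq with h1 _; exact absurd h1 hb
  · rename_i heq; injection heq with h1 h2; rw [h1, h2]

-- Core invariant, by strong induction on length: outside a string A's loop equals B's scan,
-- and inside a string A's loop produces B's string token followed by B's scan of the rest.
theorem pvKey : ∀ (n : Nat) (l : List Char), l.length ≤ n →
    (pvALoop l false false = pvBScan l ∧
     pvALoop l true false = (pvBStr l).1 ++ pvBScan (pvBStr l).2) := by
  intro n
  induction n with
  | zero =>
    intro l h
    have : l = [] := List.eq_nil_of_length_eq_zero (Nat.le_zero.mp h)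
    subst this
    simp [pvALoop, pvBScan, pvBStr]
  | succ n ih =>
    intro l h
    match l with
    | [] => simp [pvALoop, pvBScan, pvBStr]
    | c :: rest =>
      constructor
      · -- outside a string
        by_cases hb : c = '\\'
        · subst hb
          match rest with
          | [] => simp [pvALoop, pvBScan]
          | d :: rest' =>
            have hlen : rest'.length ≤ n := by simp at h; omega
            simp [pvALoop, pvBScan, (ih rest' hlen).1]
        · by_cases hq : c = '"'
          · subst hq
            have hlen : rest.length ≤ n := by simp at h; omega
            simp [pvALoop, pvBScan, (ih rest hlen).2]
          · by_cases hc : c = '/' ∧ rest.head? = some '/'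
            · obtain ⟨hc1, hc2⟩ := hc
              subst hc1
              cases rest with
              | nil => cases hc2
              | cons d rest' =>
                have hd : d = '/' := by simpa using hc2
                subst hd
                simp [pvALoop, pvBScan]
            · have hlen : rest.length ≤ n := by simp at h; omega
              have hrec := (ih rest hlen).1
              rw [pvBScan_other c rest hb hq hc, ← hrec]
              simp [pvALoop, hb, hq]
              intro hne h1
              cases rest with
              | nil => exact absurd rfl hne
              | cons d r =>
                intro ht
                simp only [List.take_succ_cons, List.take_zero] at ht
                have hd : d = '/' := by simpa using ht
                exact hc ⟨h1, by rw [hd]; rfl⟩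
      · -- inside a string
        by_cases hq : c = '"'
        · subst hq
          have hlen : rest.length ≤ n := by simp at h; omega
          simp [pvALoop, pvBStr, (ih rest hlen).1]
        · by_cases hb : c = '\\'
          · subst hb
            match rest with
            | [] => simp [pvALoop, pvBStr, pvBScan]
            | d :: rest' =>
              have hlen : rest'.length ≤ n := by simp at h; omega
              simp [pvALoop, pvBStr, (ih rest' hlen).2]
          · have hlen : rest.length ≤ n := by simp at h; omega
            have hrec := (ih rest hlen).2
            rw [pvBStr_other c rest hb hq]
            simp [pvALoop, hb, hq, hrec]

theorem pvPerLine (l : List Char) : pvALoop l false false = pvBScan l :=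
  (pvKey l.length l le_rfl).1

-- ===== VERDICT (by name: the statement is the Claim_ definition above) =====
theorem remove_jsonc_comments_py_spec : Claim_equal_remove_jsonc_comments_py := by
  intro content _
  unfold Spec_remove_jsonc_comments_py remove_jsonc_comments_py remove_jsonc_comments_py_alt
  congr 1
  exact List.map_congr_left (fun s _ => by rw [pvPerLine])
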